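-- pv_equiv track=rewrite | github.com/MikhailKardash/LoL-Champ-Select-Markov-Model | data_functions.py | create_constrained_space
-- ===== SOURCE A (Python) =====
-- def create_constrained_space(space,team_A_list,team_B_list):
--     out = space
--     if len(team_A_list) > 0:
--         for A in team_A_list:
--             out = [el for el in out if A in el[0]]
--     if len(team_B_list) > 0:
--         for B in team_B_list:
--             out = [el for el in out if B in el[1]]
--     return out
-- ===== SOURCE B (Python) =====
-- def create_constrained_space(space, team_A_list, team_B_list):
--     return [el for el in space
--             if all(a in el[0] for a in team_A_list)
--             and all(b in el[1] for b in team_B_list)]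
-- ===== Notes on version B (the rewrite author's own statement) =====
-- stated objective: simpler
-- what changed: One list-comprehension pass over space with a combined all()-predicate replaces the sequence of filter passes (one rebuild of the list per team member) and the len>0 guards.
import Mathlib
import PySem

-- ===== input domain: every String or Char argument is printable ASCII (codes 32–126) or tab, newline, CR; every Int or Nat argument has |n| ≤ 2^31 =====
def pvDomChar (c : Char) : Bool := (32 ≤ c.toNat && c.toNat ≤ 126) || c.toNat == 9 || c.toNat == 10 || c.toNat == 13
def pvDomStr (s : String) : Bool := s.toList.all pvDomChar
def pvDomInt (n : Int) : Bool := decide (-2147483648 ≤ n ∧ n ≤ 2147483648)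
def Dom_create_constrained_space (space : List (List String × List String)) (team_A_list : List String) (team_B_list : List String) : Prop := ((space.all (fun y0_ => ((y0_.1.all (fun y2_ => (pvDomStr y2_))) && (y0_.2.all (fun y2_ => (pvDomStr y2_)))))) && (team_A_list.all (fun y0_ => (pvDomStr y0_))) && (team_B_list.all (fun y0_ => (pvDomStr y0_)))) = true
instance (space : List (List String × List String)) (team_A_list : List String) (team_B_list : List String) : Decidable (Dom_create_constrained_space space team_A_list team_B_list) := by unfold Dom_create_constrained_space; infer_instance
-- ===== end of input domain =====

-- B replaces A's sequential per-member filter passes by a single pass with one combined predicate (simpler, same cost).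
-- ===== PORT A =====
-- Port of A: sequential filter passes, one per team member, behind len>0 guards.
def create_constrained_space (space : List (List String × List String)) (team_A_list : List String) (team_B_list : List String) : List (List String × List String) :=
  let out := space
  let out := if team_A_list.length > 0 then
      team_A_list.foldl (fun out A => out.filter (fun el => decide (A ∈ el.1))) out
    else out
  let out := if team_B_list.length > 0 then
      team_B_list.foldl (fun out B => out.filter (fun el => decide (B ∈ el.2))) out
    else out
  out

-- ===== PORT B =====
-- Port of B: one pass with a combined all-predicate.
def create_constrained_space_alt (space : List (List String × List String)) (team_A_list : List String) (team_B_list : List String) : List (List String × List String) :=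
  space.filter (fun el =>
    team_A_list.all (fun a => decide (a ∈ el.1)) && team_B_list.all (fun b => decide (b ∈ el.2)))

-- ===== PRECONDITION & SPEC =====
def Spec_create_constrained_space (space : List (List String × List String)) (team_A_list : List String) (team_B_list : List String) (out : List (List String × List String)) : Prop := out = create_constrained_space_alt space team_A_list team_B_list
instance (space : List (List String × List String)) (team_A_list : List String) (team_B_list : List String) (out : List (List String × List String)) : Decidable (Spec_create_constrained_space space team_A_list team_B_list out) := by unfold Spec_create_constrained_space; infer_instance

-- ===== CLAIM (what is proved, stated in full; the proofs are below) =====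
def Claim_equal_create_constrained_space : Prop := ∀ (space : List (List String × List String)) (team_A_list : List String) (team_B_list : List String), Dom_create_constrained_space space team_A_list team_B_list → Spec_create_constrained_space space team_A_list team_B_list (create_constrained_space space team_A_list team_B_list)

-- ===== LEMMAS AND PROOFS =====

-- ===== VERDICT (by name: the statement is the Claim_ definition above) =====
theorem foldl_filter_eq_filter_all {α β : Type} (p : β → α → Bool) (ts : List β) (o : List α) :
    ts.foldl (fun o t => o.filter (p t)) o = o.filter (fun el => ts.all (fun t => p t el)) := by
  induction ts generalizing o with
  | nil => simp
  | cons t ts ih =>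
    simp only [List.foldl_cons, ih, List.filter_filter, List.all_cons]
    exact List.filter_congr (fun el _ => by rw [Bool.and_comm])

theorem create_constrained_space_spec : Claim_equal_create_constrained_space := by
  intro space tA tB _
  unfold Spec_create_constrained_space create_constrained_space create_constrained_space_alt
  rcases tA with _ | ⟨a, tA⟩ <;> rcases tB with _ | ⟨b, tB⟩ <;>
    simp [foldl_filter_eq_filter_all, List.filter_filter, Bool.and_comm, Bool.and_assoc,
      Bool.and_left_comm]
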